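-- pv_equiv track=rewrite | github.com/raulferrodrigues/introRedes | T1Intro.py | decodificador_nrzi
-- ===== SOURCE A (Python) =====
-- def binToHex(Str):
--     decimal_representation = int(Str, 2)
--     hexadecimal_string = hex(decimal_representation)
--     return hexadecimal_string[2:]
--
-- def decodificador_nrzi(sinal):
--     sinalBinario = ""
--     for elem in range(0, len(sinal)):
--         if sinal[elem] == "-":
--             sinalBinario = sinalBinario + "0"
--         else:
--             sinalBinario = sinalBinario + "1"
--     lastSignal = "0"
--     sinalDecodificado = ""
--     for elem in range(0, len(sinalBinario)):
--         if sinalBinario[elem] == lastSignal: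
--             sinalDecodificado = sinalDecodificado + "0"
--         else:
--             if lastSignal == "0":
--                 sinalDecodificado = sinalDecodificado + "1"
--                 lastSignal = "1"
--             elif lastSignal == "1":
--                 sinalDecodificado = sinalDecodificado + "1"
--                 lastSignal = "0"
--     return binToHex(sinalDecodificado)
-- ===== SOURCE B (Python) =====
-- def decodificador_nrzi(sinal):
--     levels = int("".join("0" if c == "-" else "1" for c in sinal), 2)
--     return format(levels ^ (levels >> 1), "x")
-- ===== Notes on version B (the rewrite author's own statement) =====
-- stated objective: faster
-- what changed: Replaces A's two Python-level passes (build a binary string char by char, then run a lastSignal state machine emitting an output bit string that binToHex re-parses) with integer Gray-code decoding: parse the level pattern as one binary integer L and compute the decoded value directly as L ^ (L >> 1), formatted in hex; no output bit string or per-symbol state machine exists in B, the per-character work happens inside C builtins.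
-- outside the precondition, e.g. on decodificador_nrzi(''): A raises ValueError, B raises ValueError
import Mathlib
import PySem

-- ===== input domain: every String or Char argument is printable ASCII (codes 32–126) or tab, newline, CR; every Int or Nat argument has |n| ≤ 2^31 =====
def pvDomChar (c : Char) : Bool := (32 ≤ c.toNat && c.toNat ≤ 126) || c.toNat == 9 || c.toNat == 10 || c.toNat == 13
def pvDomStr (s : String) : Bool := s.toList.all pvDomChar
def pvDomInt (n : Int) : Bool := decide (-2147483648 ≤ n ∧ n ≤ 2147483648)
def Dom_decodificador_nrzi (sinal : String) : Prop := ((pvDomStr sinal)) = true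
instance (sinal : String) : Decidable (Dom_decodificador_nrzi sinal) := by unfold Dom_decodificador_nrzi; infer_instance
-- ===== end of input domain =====

-- B replaces A's two passes (binary string + lastSignal state machine + binToHex re-parse)
-- with integer Gray-code decoding: the levels parsed as one binary integer L, decoded value
-- L xor (L >> 1), formatted in hex. Same return value on every nonempty input.

-- ===== PORT A =====
-- hex digit for 0..15, as Python's hex()/format(.., "x") produce (lowercase)
def pvHexDigit (d : Nat) : Char := if d < 10 then Char.ofNat (48 + d) else Char.ofNat (87 + d)

-- digits of n in base 16, most significant first (hex rendering without prefix, n > 0)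
def pvNatToHexAux (n : Nat) (acc : List Char) : List Char :=
  if h : n = 0 then acc else pvNatToHexAux (n / 16) (pvHexDigit (n % 16) :: acc)
termination_by n
decreasing_by exact Nat.div_lt_self (Nat.pos_of_ne_zero h) (by norm_num)

-- port of binToHex: int(Str, 2) followed by hex(..)[2:]; exact for nonempty strings of
-- '0'/'1' characters (the only strings A passes to it under Pre_)
def pyBinToHex (bits : List Char) : String :=
  let n := bits.foldl (fun a c => 2 * a + (if c = '1' then 1 else 0)) 0
  if n = 0 then "0" else String.ofList (pvNatToHexAux n [])

def decodificador_nrzi (sinal : String) : String :=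
  let sinalBinario := sinal.toList.foldl
    (fun acc c => acc ++ [if c = '-' then '0' else '1']) []
  let st := sinalBinario.foldl
    (fun (p : List Char × Char) b =>
      if b = p.2 then (p.1 ++ ['0'], p.2)
      else if p.2 = '0' then (p.1 ++ ['1'], '1')
      else if p.2 = '1' then (p.1 ++ ['1'], '0')
      else (p.1, p.2)) ([], '0')
  pyBinToHex st.1

-- ===== PORT B =====
-- int("".join("0" if c == "-" else "1" for c in sinal), 2): the base-2 value of the levels
-- then format(levels ^ (levels >> 1), "x"): "0" for 0, else lowercase hex digits
def decodificador_nrzi_alt (sinal : String) : String :=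
  let levels := sinal.toList.foldl (fun a c => 2 * a + (if c = '-' then 0 else 1)) 0
  let d := levels ^^^ (levels >>> 1)
  if d = 0 then "0" else String.ofList (pvNatToHexAux d [])

-- ===== PRECONDITION & SPEC =====
-- Pre_ excludes the empty string only: there both A and B raise ValueError (int("", 2)).
def Pre_decodificador_nrzi (sinal : String) : Prop := sinal ≠ ""
instance (sinal : String) : Decidable (Pre_decodificador_nrzi sinal) := by
  unfold Pre_decodificador_nrzi; infer_instance

def pvWitness_decodificador_nrzi : String := "-++-"

def Spec_decodificador_nrzi (sinal : String) (out : String) : Prop := out = decodificador_nrzi_alt sinal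
instance (sinal : String) (out : String) : Decidable (Spec_decodificador_nrzi sinal out) := by
  unfold Spec_decodificador_nrzi; infer_instance

-- ===== CLAIM =====
def Claim_equal_decodificador_nrzi : Prop := ∀ (sinal : String), Dom_decodificador_nrzi sinal → Pre_decodificador_nrzi sinal → Spec_decodificador_nrzi sinal (decodificador_nrzi sinal)

-- ===== LEMMAS AND PROOFS =====

-- the base-2 value of a list of bits, most significant first
def pvVal (ls : List Nat) : Nat := ls.foldl (fun a b => 2 * a + b) 0

-- NRZI transition bits: 1 where the level changes from its predecessor
def pvDiff : Nat → List Nat → List Nat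
  | _, [] => []
  | prev, l :: ls => (if prev ≠ l then 1 else 0) :: pvDiff l ls

def pvLvlChar (l : Nat) : Char := if l = 0 then '0' else '1'
def pvBitChar (b : Nat) : Char := if b = 1 then '1' else '0'

-- A's first pass builds the map of the level characters
theorem pvFirstPass (cs : List Char) (acc : List Char) :
    cs.foldl (fun acc c => acc ++ [if c = '-' then '0' else '1']) acc
      = acc ++ cs.map (fun c => if c = '-' then '0' else '1') := by
  induction cs generalizing acc with
  | nil => simp
  | cons c cs ih => simp [List.foldl, ih]

-- A's state machine over level characters emits exactly the transition bits
theorem pvSecondPass (ls : List Nat) (hls : ∀ l ∈ ls, l = 0 ∨ l = 1)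
    (prev : Nat) (hprev : prev = 0 ∨ prev = 1) (out : List Char) :
    (ls.map pvLvlChar).foldl
      (fun (p : List Char × Char) b =>
        if b = p.2 then (p.1 ++ ['0'], p.2)
        else if p.2 = '0' then (p.1 ++ ['1'], '1')
        else if p.2 = '1' then (p.1 ++ ['1'], '0')
        else (p.1, p.2)) (out, pvLvlChar prev)
      = (out ++ (pvDiff prev ls).map pvBitChar,
         pvLvlChar (ls.foldl (fun _ x => x) prev)) := by
  induction ls generalizing prev out with
  | nil => simp [pvDiff]
  | cons l ls ih =>
    have hrest : ∀ x ∈ ls, x = 0 ∨ x = 1 := fun x hx => hls x (List.mem_cons_of_mem _ hx)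
    have hl : l = 0 ∨ l = 1 := hls l List.mem_cons_self
    rcases hl with rfl | rfl <;> rcases hprev with rfl | rfl
    · have H := ih hrest 0 (Or.inl rfl) (out ++ ['0'])
      simp [pvLvlChar, pvDiff, pvBitChar] at H ⊢
      simpa [List.append_assoc] using H
    · have H := ih hrest 0 (Or.inl rfl) (out ++ ['1'])
      simp [pvLvlChar, pvDiff, pvBitChar] at H ⊢
      simpa [List.append_assoc] using H
    · have H := ih hrest 1 (Or.inr rfl) (out ++ ['1'])
      simp [pvLvlChar, pvDiff, pvBitChar] at H ⊢
      simpa [List.append_assoc] using H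
    · have H := ih hrest 1 (Or.inr rfl) (out ++ ['0'])
      simp [pvLvlChar, pvDiff, pvBitChar] at H ⊢
      simpa [List.append_assoc] using H

-- reading bit characters back as a number recovers pvVal
theorem pvFoldBitChar (bs : List Nat) (hbs : ∀ b ∈ bs, b ≤ 1) (a : Nat) :
    (bs.map pvBitChar).foldl (fun a c => 2 * a + (if c = '1' then 1 else 0)) a
      = bs.foldl (fun a b => 2 * a + b) a := by
  induction bs generalizing a with
  | nil => rfl
  | cons b bs ih =>
    have hb : b ≤ 1 := hbs b List.mem_cons_self
    have hrest : ∀ x ∈ bs, x ≤ 1 := fun x hx => hbs x (List.mem_cons_of_mem _ hx)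
    interval_cases b
    · simpa [pvBitChar] using ih hrest (2 * a)
    · simpa [pvBitChar] using ih hrest (2 * a + 1)

theorem pvValSnoc (ls : List Nat) (x : Nat) : pvVal (ls ++ [x]) = 2 * pvVal ls + x := by
  simp [pvVal]

theorem pvDiffSnoc (prev : Nat) (ls : List Nat) (x : Nat) :
    pvDiff prev (ls ++ [x]) = pvDiff prev ls ++ [if ls.getLastD prev ≠ x then 1 else 0] := by
  induction ls generalizing prev with
  | nil => simp [pvDiff]
  | cons l ls ih =>
    simp only [List.cons_append, pvDiff, ih]
    cases ls with
    | nil => simp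
    | cons h t =>
      obtain ⟨y, hy⟩ := Option.isSome_iff_exists.mp
        (List.getLast?_isSome.mpr (List.cons_ne_nil h t))
      simp [hy]

theorem pvValMod (ls : List Nat) (hls : ∀ l ∈ ls, l ≤ 1) : pvVal ls % 2 = ls.getLastD 0 := by
  induction ls using List.reverseRecOn with
  | nil => rfl
  | append_singleton ls x ih =>
    have hx : x ≤ 1 := hls x (by simp)
    simp [pvValSnoc]
    omega

theorem pvAddBit (a b : Nat) (hb : b ≤ 1) : 2 * a + b = 2 * a ^^^ b := by
  interval_cases b
  · simp
  · apply Nat.eq_of_testBit_eq; intro i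
    rcases i with _ | i <;>
      simp [Nat.testBit_zero, Nat.testBit_add_one, Nat.mul_add_div]

theorem pvMulXor (a b : Nat) : 2 * a ^^^ 2 * b = 2 * (a ^^^ b) := by
  apply Nat.eq_of_testBit_eq; intro i
  rcases i with _ | i <;>
    simp [Nat.testBit_xor, Nat.testBit_zero, Nat.testBit_add_one, Nat.xor_div_two,
      Nat.mul_mod_right, Nat.mul_div_cancel_left _ (by norm_num : (0:Nat) < 2)]

-- the key Gray-code step: appending one bit
theorem pvKey (L x : Nat) (hx : x ≤ 1) :
    (2 * L + x) ^^^ ((2 * L + x) >>> 1)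
      = 2 * (L ^^^ (L >>> 1)) + (if L % 2 ≠ x then 1 else 0) := by
  obtain ⟨q, r, hr, rfl⟩ : ∃ q r, r ≤ 1 ∧ L = 2 * q + r := ⟨L / 2, L % 2, by omega, by omega⟩
  have hdiv : (2 * (2 * q + r) + x) >>> 1 = 2 * q + r := by rw [Nat.shiftRight_one]; omega
  have hdiv2 : (2 * q + r) >>> 1 = q := by rw [Nat.shiftRight_one]; omega
  have hmod : (2 * q + r) % 2 = r := by omega
  have hd : (if r ≠ x then (1 : Nat) else 0) = r ^^^ x := by
    interval_cases x <;> interval_cases r <;> decide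
  have hrx : r ^^^ x ≤ 1 := by interval_cases x <;> interval_cases r <;> decide
  rw [hdiv, hdiv2, hmod, hd, pvAddBit q r hr, pvAddBit _ x hx, pvAddBit _ _ hrx]
  simp only [← pvMulXor]
  simp [Nat.xor_assoc, Nat.xor_comm, Nat.xor_left_comm]

theorem pvDiffLe (prev : Nat) (ls : List Nat) : ∀ b ∈ pvDiff prev ls, b ≤ 1 := by
  induction ls generalizing prev with
  | nil => simp [pvDiff]
  | cons l tl ih =>
    intro b hb
    simp [pvDiff] at hb
    rcases hb with rfl | hb
    · split <;> omega
    · exact ih l b hb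

-- main arithmetic lemma: the value of the transition bits is L xor (L >> 1)
theorem pvMain (ls : List Nat) (hls : ∀ l ∈ ls, l ≤ 1) :
    pvVal (pvDiff 0 ls) = pvVal ls ^^^ (pvVal ls >>> 1) := by
  induction ls using List.reverseRecOn with
  | nil => rfl
  | append_singleton ls x ih =>
    have hx : x ≤ 1 := hls x (by simp)
    have hrest : ∀ l ∈ ls, l ≤ 1 := fun l hl => hls l (by simp [hl])
    rw [pvDiffSnoc, pvValSnoc, ih hrest, pvValSnoc, pvKey _ _ hx, ← pvValMod ls hrest]

-- ===== VERDICT =====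
theorem decodificador_nrzi_spec : Claim_equal_decodificador_nrzi := by
  intro sinal _ _
  unfold Spec_decodificador_nrzi decodificador_nrzi decodificador_nrzi_alt
  set ls := sinal.toList.map (fun c => if c = '-' then (0 : Nat) else 1) with hlsdef
  have hbits : ∀ l ∈ ls, l = 0 ∨ l = 1 := by
    intro l hl; simp [hlsdef] at hl; obtain ⟨c, _, hc⟩ := hl
    by_cases h : c = '-' <;> simp [h] at hc <;> omega
  have hle : ∀ l ∈ ls, l ≤ 1 := fun l hl => by rcases hbits l hl with rfl | rfl <;> omega
  have hmap : sinal.toList.map (fun c => if c = '-' then '0' else '1') = ls.map pvLvlChar := by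
    rw [hlsdef, List.map_map]
    refine List.map_congr_left ?_
    intro c _
    by_cases h : c = '-' <;> simp [h, pvLvlChar]
  have hfold : sinal.toList.foldl (fun a c => 2 * a + (if c = '-' then 0 else 1)) 0
      = pvVal ls := by
    rw [hlsdef, pvVal, List.foldl_map]
  have hc0 : pvLvlChar 0 = '0' := rfl
  have h2 := pvSecondPass ls hbits 0 (Or.inl rfl) []
  rw [hc0] at h2
  simp only [pvFirstPass, List.nil_append, hmap, h2, pyBinToHex,
    pvFoldBitChar _ (pvDiffLe 0 ls) 0, hfold]
  rw [show (List.foldl (fun a b => 2 * a + b) 0 (pvDiff 0 ls))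
        = pvVal ls ^^^ pvVal ls >>> 1 from pvMain ls hle]
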